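-- pv_equiv track=rewrite | github.com/NJiHyeon/Algorithm_Study | 프로그래머스/2/17687. ［3차］ n진수 게임/［3차］ n진수 게임.py | solution
-- ===== SOURCE A (Python) =====
-- def solution(n, t, m, p):
--     answer = '0'
--     i = 0
--     while True :
--         i += 1
--         answer += jinsu(i, n)
--         if len(answer) >= (m*t) :
--             break
--     real = ''
--     for i in range(p-1, len(answer), m) :
--         real += answer[i]
--         if len(real) == t :
--             return real
--
-- def jinsu(n, k) :
--     rev_base = ''
--     while n > 0 :
--         n, mod = divmod(n, k)
--         if mod == 10 :
--             mod = 'A'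
--         elif mod == 11 :
--             mod = 'B'
--         elif mod == 12 :
--             mod = 'C'
--         elif mod == 13 :
--             mod = 'D'
--         elif mod == 14 :
--             mod = 'E'
--         elif mod == 15 :
--             mod = 'F'
--         rev_base += str(mod)
--     return rev_base[::-1]
-- ===== SOURCE B (Python) =====
-- DIGITS = "0123456789ABCDEF"
--
-- def solution(n, t, m, p):
--     # the sample string: '0' then 1, 2, 3, ... written in base n, built with an
--     # odometer (the current number's digits, incremented in place) until it is
--     # at least m*t characters long
--     chars = ['0']
--     ctr = []                     # base-n digits of the current number, most significant first
--     while len(chars) < m * t: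
--         j = len(ctr) - 1
--         while j >= 0 and ctr[j] == n - 1:
--             ctr[j] = 0
--             j -= 1
--         if j < 0:
--             ctr.insert(0, 1)
--         else:
--             ctr[j] += 1
--         for d in ctr:
--             chars.append(DIGITS[d])
--     return ''.join(chars[p - 1 + k * m] for k in range(t))
-- ===== Notes on version B (the rewrite author's own statement) =====
-- stated objective: alternative
-- what changed: B builds the sample string with a base-n odometer (the current number's digit list incremented in place, amortized O(1) new digits per step) instead of converting every number 1,2,3,... by a fresh divmod/elif loop, and picks the t requested characters at directly computed positions p-1+k*m instead of scanning a range with an accumulator and early return; …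
-- outside the precondition, e.g. on solution(17, 17, 1, 1): A returns '0123456789ABCDEF6', B raises IndexError; on solution(-2, 2, 2, 1): A returns '0-', B returns '02'; on solution(2, 1, 1, 2): A returns '1', B raises IndexError
import Mathlib
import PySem

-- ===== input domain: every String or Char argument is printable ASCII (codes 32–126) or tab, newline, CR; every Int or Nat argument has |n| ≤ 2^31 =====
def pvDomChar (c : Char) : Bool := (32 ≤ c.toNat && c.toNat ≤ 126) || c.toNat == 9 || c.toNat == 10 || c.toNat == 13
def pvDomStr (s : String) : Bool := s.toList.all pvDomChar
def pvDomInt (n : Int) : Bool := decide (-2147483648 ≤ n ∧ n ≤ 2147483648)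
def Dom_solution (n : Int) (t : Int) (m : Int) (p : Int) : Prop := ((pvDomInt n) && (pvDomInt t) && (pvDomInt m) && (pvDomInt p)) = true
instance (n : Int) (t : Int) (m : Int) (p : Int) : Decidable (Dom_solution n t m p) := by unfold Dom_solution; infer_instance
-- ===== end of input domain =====

-- B builds the same sample string with a base-n odometer (the current number's digits,
-- incremented in place) instead of converting every number by repeated divmod, and picks
-- the t characters at computed positions instead of scanning a range with an early return.

-- ===== PORT A =====

-- body of jinsu's if/elif chain followed by `rev_base += str(mod)`
def jinsuDigit (mod : Int) : String :=
  if mod = 10 then "A"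
  else if mod = 11 then "B"
  else if mod = 12 then "C"
  else if mod = 13 then "D"
  else if mod = 14 then "E"
  else if mod = 15 then "F"
  else PySem.Int.toStr mod

-- `while n > 0 : n, mod = divmod(n, k); … ; rev_base += str(mod)`.
-- The extra conjunct `2 ≤ k` is only a totality guard: for k = 1 Python diverges and for
-- k = 0 it raises ZeroDivisionError; Pre_solution restricts the base to 2..16 anyway.
def jinsuLoop (n k : Int) (rev : List Char) : List Char :=
  if h : 0 < n ∧ 2 ≤ k then
    jinsuLoop (PySem.Int.floordiv n k) k (rev ++ (jinsuDigit (PySem.Int.mod n k)).toList)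
  else rev
termination_by n.toNat
decreasing_by
  have h1 : PySem.Int.floordiv n k = n / k := PySem.Int.floordiv_eq_ediv_of_pos (by omega)
  have h2 : n / k < n := Int.ediv_lt_of_lt_mul (by omega) (by nlinarith [h.1, h.2])
  have h3 : 0 ≤ n / k := Int.ediv_nonneg (by omega) (by omega)
  omega

-- `return rev_base[::-1]`  ([::-1] is reversal)
def jinsu (n k : Int) : List Char := (jinsuLoop n k []).reverse

-- the `while True` loop of solution; the fuel only makes the recursion total, Python's own
-- stopping condition (len(answer) >= m*t, tested after each append) fires first on Pre_solution
def aLoop (n mt : Int) (fuel : Nat) (i : Int) (answer : List Char) : List Char :=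
  match fuel with
  | 0 => answer
  | fuel + 1 =>
    let i' := i + 1
    let answer' := answer ++ jinsu i' n
    if mt ≤ (answer'.length : Int) then answer' else aLoop n mt fuel i' answer'

-- `for i in range(p-1, len(answer), m) : real += answer[i]; if len(real) == t : return real`
-- none = Python returned None (loop exhausted) or raised IndexError; both are outside Pre_solution
def sampleLoop (answer : List Char) (t : Int) (idxs : List Int) (real : List Char) : Option (List Char) :=
  match idxs with
  | [] => none
  | i :: rest =>
    match PySem.List.pyGet? answer i with
    | none => none
    | some c =>
      let real' := real ++ [c]
      if (real'.length : Int) = t then some real' else sampleLoop answer t rest real'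

def solution (n : Int) (t : Int) (m : Int) (p : Int) : String :=
  let answer := aLoop n (m * t) (m * t).toNat 0 ['0']
  match sampleLoop answer t (PySem.List.pyRange (p - 1) (answer.length : Int) m) [] with
  | some real => String.mk real
  | none => ""   -- Python returns None / raises here; excluded by Pre_solution

-- ===== PORT B =====

def bDigits : String := "0123456789ABCDEF"

-- the inner `while j >= 0 and ctr[j] == n - 1 : …` walks ctr from its last index zeroing
-- (n-1)-digits, then bumps the first other digit (`ctr[j] += 1`) or, if the walk fell off
-- the front (`j < 0`), prepends 1 (`ctr.insert(0, 1)`): structural recursion on ctr reversed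
def incBack (n : Int) : List Int → List Int
  | [] => [1]
  | d :: rest => if d = n - 1 then 0 :: incBack n rest else (d + 1) :: rest

-- `while len(chars) < m*t : <increment ctr>; for d in ctr : chars.append(DIGITS[d])`;
-- the fuel only makes the recursion total (each pass appends at least one character);
-- `DIGITS[d]` can raise IndexError only for a base > 16, outside Pre_solution (the .getD '?')
def bLoop (n need : Int) (fuel : Nat) (ctr : List Int) (chars : List Char) : List Char :=
  match fuel with
  | 0 => chars
  | fuel + 1 =>
    if (chars.length : Int) < need then
      let ctr' := (incBack n ctr.reverse).reverse
      bLoop n need fuel ctr' (chars ++ ctr'.map (fun d => (PySem.Str.pyGet? bDigits d).getD '?'))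
    else chars

-- `''.join(chars[p - 1 + k * m] for k in range(t))`; chars[…] can raise IndexError
-- only outside Pre_solution (the .getD '?')
def solution_alt (n : Int) (t : Int) (m : Int) (p : Int) : String :=
  let chars := bLoop n (m * t) (m * t).toNat [] ['0']
  String.mk ((PySem.List.pyRange 0 t 1).map
    (fun k => (PySem.List.pyGet? chars (p - 1 + k * m)).getD '?'))

-- ===== PRECONDITION & SPEC =====

-- Pre_ is the problem's natural domain: base 2..16, t,m ≥ 1, and every sampled position
-- p-1+k*m inside the guaranteed part of the stream (1-m*t ≤ p ≤ m, wrapped positions allowed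
-- except in the degenerate m*t = 1 case).  Outside it A returns None or raises IndexError
-- (t < 1, p > m, p < 1-m*t, m < 1), diverges (n = 1), or returns a string whose characters
-- are an accident of A's string building (multi-char str(mod) pieces for n > 16 or n < 2,
-- and for m*t = 1, p ≤ 0 a wrap on the one-number overshoot, a corner no one would specify).
def Pre_solution (n : Int) (t : Int) (m : Int) (p : Int) : Prop :=
  2 ≤ n ∧ n ≤ 16 ∧ 1 ≤ t ∧ 1 ≤ m ∧ 1 - m * t ≤ p ∧ p ≤ m ∧ (1 ≤ p ∨ 2 ≤ m * t)
instance (n : Int) (t : Int) (m : Int) (p : Int) : Decidable (Pre_solution n t m p) := by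
  unfold Pre_solution; infer_instance

def pvWitness_solution : Int × Int × Int × Int := (2, 3, 2, 1)

def Spec_solution (n : Int) (t : Int) (m : Int) (p : Int) (out : String) : Prop := out = solution_alt n t m p
instance (n : Int) (t : Int) (m : Int) (p : Int) (out : String) : Decidable (Spec_solution n t m p out) := by
  unfold Spec_solution; infer_instance

-- ===== CLAIM (what is proved, stated in full; the proofs are below) =====
def Claim_equal_solution : Prop := ∀ (n : Int) (t : Int) (m : Int) (p : Int), Dom_solution n t m p → Pre_solution n t m p → Spec_solution n t m p (solution n t m p)

-- ===== LEMMAS AND PROOFS =====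

-- math-side vocabulary: dchar d is the digit character, rep N i the base-N rendering of i,
-- F N K the stream "0" ++ rep 1 ++ … ++ rep K that both loops build.

def dchar (d : Nat) : Char :=
  (['0','1','2','3','4','5','6','7','8','9','A','B','C','D','E','F']).getD d '?'

def rep (N i : Nat) : List Char := ((Nat.digits N i).map dchar).reverse

def F (N K : Nat) : List Char := (((List.range' 1 K)).map (rep N)).flatten

-- the odometer state after number i, as stored by B (most significant digit first)
def ctrOf (N i : Nat) : List Int := ((Nat.digits N i).map Int.ofNat).reverse

lemma jinsuDigit_eq (d : Nat) (h : d < 16) : (jinsuDigit (d : Int)).toList = [dchar d] := by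
  interval_cases d <;> decide

lemma pyGet_bDigits (d : Nat) (h : d < 16) :
    PySem.Str.pyGet? bDigits (d : Int) = some (dchar d) := by
  interval_cases d <;> decide

lemma jinsuLoop_eq (N : Nat) (hN2 : 2 ≤ N) (hN16 : N ≤ 16) :
    ∀ (i : Nat) (rev : List Char), jinsuLoop (i : Int) (N : Int) rev = rev ++ (Nat.digits N i).map dchar := by
  intro i
  induction i using Nat.strong_induction_on with
  | _ i IH =>
    intro rev
    rw [jinsuLoop]
    by_cases hi : 0 < i
    · rw [dif_pos ⟨by exact_mod_cast hi, by exact_mod_cast hN2⟩]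
      have hmodlt : i % N < 16 := by
        have := Nat.mod_lt i (show 0 < N by omega); omega
      rw [PySem.Int.floordiv_natCast, PySem.Int.mod_natCast, jinsuDigit_eq _ hmodlt,
        IH (i / N) (Nat.div_lt_self hi (by omega)), Nat.digits_def' (show 1 < N by omega) hi]
      simp
    · have h0 : i = 0 := by omega
      subst h0
      rw [dif_neg (by simp)]
      simp

lemma jinsu_eq (N : Nat) (hN2 : 2 ≤ N) (hN16 : N ≤ 16) (i : Nat) :
    jinsu (i : Int) (N : Int) = rep N i := by
  rw [jinsu, jinsuLoop_eq N hN2 hN16 i []]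
  simp [rep]

-- the odometer increment is the base-N successor on the digit list
lemma incBack_digits (N : Nat) (hN2 : 2 ≤ N) :
    ∀ i : Nat, incBack (N : Int) ((Nat.digits N i).map Int.ofNat)
      = (Nat.digits N (i + 1)).map Int.ofNat := by
  intro i
  induction i using Nat.strong_induction_on with
  | _ i IH =>
    by_cases hi : 0 < i
    · have hdm := Nat.div_add_mod i N
      have hmlt : i % N < N := Nat.mod_lt i (by omega)
      rw [Nat.digits_def' (show 1 < N by omega) hi, List.map_cons]
      simp only [incBack, Int.ofNat_eq_natCast]
      by_cases hc : i % N = N - 1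
      · rw [if_pos (by rw [hc]; omega)]
        have hsucc : i + 1 = N * (i / N + 1) := by rw [Nat.mul_add, Nat.mul_one]; omega
        have hd1 : (i + 1) / N = i / N + 1 := by
          rw [hsucc, Nat.mul_div_cancel_left _ (show 0 < N by omega)]
        have hm1 : (i + 1) % N = 0 := by rw [hsucc, Nat.mul_mod_right]
        rw [show Nat.digits N (i + 1) = (i + 1) % N :: Nat.digits N ((i + 1) / N) from
            Nat.digits_def' (show 1 < N by omega) (by omega), hd1, hm1,
          IH (i / N) (Nat.div_lt_self hi (by omega))]
        simp
      · rw [if_neg (by intro h; exact hc (by omega))]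
        obtain ⟨hd1, hm1⟩ := (Nat.div_mod_unique (show 0 < N by omega)).mpr
          ⟨(show i % N + 1 + N * (i / N) = i + 1 by omega), (show i % N + 1 < N by omega)⟩
        rw [show Nat.digits N (i + 1) = (i + 1) % N :: Nat.digits N ((i + 1) / N) from
            Nat.digits_def' (show 1 < N by omega) (by omega), hd1, hm1]
        push_cast
        simp
    · have h0 : i = 0 := by omega
      subst h0
      have h1 : Nat.digits N 1 = [1] := by
        rw [Nat.digits_def' (show 1 < N by omega) (by omega),
          Nat.mod_eq_of_lt (by omega), Nat.div_eq_of_lt (by omega)]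
        simp
      simp [incBack, h1]

-- rendering the odometer through DIGITS gives exactly rep
lemma ctrOf_map (N x : Nat) (hN2 : 2 ≤ N) (hN16 : N ≤ 16) :
    (ctrOf N x).map (fun d => (PySem.Str.pyGet? bDigits d).getD '?') = rep N x := by
  unfold ctrOf rep
  rw [← List.map_reverse, ← List.map_reverse, List.map_map]
  apply List.map_congr_left
  intro d hd
  have hlt : d < N := Nat.digits_lt_base (by omega) (List.mem_reverse.mp hd)
  simp only [Function.comp, Int.ofNat_eq_natCast]
  rw [pyGet_bDigits d (by omega), Option.getD_some]

lemma F_succ (N i : Nat) : F N (i + 1) = F N i ++ rep N (i + 1) := by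
  unfold F
  rw [List.range'_concat, List.map_append, List.flatten_append]
  simp [Nat.add_comm]

lemma rep_ne_nil (N i : Nat) (hN2 : 2 ≤ N) (hi : 0 < i) : rep N i ≠ [] := by
  simp only [rep, ne_eq, List.reverse_eq_nil_iff, List.map_eq_nil_iff]
  exact Nat.digits_ne_nil_iff_ne_zero.mpr (by omega)

lemma lenF_ge (N : Nat) (hN2 : 2 ≤ N) : ∀ i, i ≤ (F N i).length := by
  intro i
  induction i with
  | zero => simp
  | succ i IH =>
    rw [F_succ, List.length_append]
    have := List.length_pos_iff.mpr (rep_ne_nil N (i + 1) hN2 (by omega))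
    omega

lemma bLoop_stop (n need : Int) (fuel : Nat) (ctr : List Int) (chars : List Char)
    (h : ¬ (chars.length : Int) < need) : bLoop n need fuel ctr chars = chars := by
  cases fuel <;> simp [bLoop, h]

-- the two builders walk in lockstep: from the state after number i (with the stream still
-- short) they produce the same list, fuel for fuel
lemma abLoop (N : Nat) (hN2 : 2 ≤ N) (hN16 : N ≤ 16) (need : Int) :
    ∀ (fuel : Nat) (i : Nat), (('0' :: F N i).length : Int) < need →
    bLoop (N : Int) need fuel (ctrOf N i) ('0' :: F N i)
      = aLoop (N : Int) need fuel (i : Int) ('0' :: F N i) := by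
  intro fuel
  induction fuel with
  | zero => intro i _; rfl
  | succ fuel IH =>
    intro i hlt
    have hi1 : ((i : Int)) + 1 = ((i + 1 : Nat) : Int) := by push_cast; ring
    have hctr : (incBack (N : Int) (ctrOf N i).reverse).reverse = ctrOf N (i + 1) := by
      unfold ctrOf
      rw [List.reverse_reverse, incBack_digits N hN2]
    have happ : ('0' :: F N i) ++ (ctrOf N (i + 1)).map (fun d => (PySem.Str.pyGet? bDigits d).getD '?')
        = '0' :: F N (i + 1) := by
      rw [ctrOf_map N (i + 1) hN2 hN16, F_succ]
      rfl
    have hj : jinsu (((i + 1 : Nat) : Int)) (N : Int) = rep N (i + 1) :=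
      jinsu_eq N hN2 hN16 (i + 1)
    have hansA : ('0' :: F N i) ++ rep N (i + 1) = '0' :: F N (i + 1) := by
      rw [F_succ]; rfl
    rw [bLoop, aLoop]
    simp only [hi1, hj, hansA, hctr, happ, if_pos hlt]
    by_cases hc : need ≤ (('0' :: F N (i + 1)).length : Int)
    · rw [if_pos hc, bLoop_stop _ _ _ _ _ (by omega)]
    · rw [if_neg hc, IH (i + 1) (by omega)]

lemma aloop (N : Nat) (hN2 : 2 ≤ N) (hN16 : N ≤ 16) (mt : Int) :
    ∀ (fuel : Nat) (i : Nat), mt ≤ 1 + (i : Int) + (fuel : Int) →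
    ∃ K : Nat, aLoop (N : Int) mt fuel (i : Int) ('0' :: F N i) = '0' :: F N K
      ∧ mt ≤ ((F N K).length : Int) + 1 := by
  intro fuel
  induction fuel with
  | zero =>
    intro i hfuel
    refine ⟨i, rfl, ?_⟩
    have := lenF_ge N hN2 i
    push_cast at hfuel ⊢
    omega
  | succ fuel IH =>
    intro i hfuel
    have hi1 : ((i : Int)) + 1 = ((i + 1 : Nat) : Int) := by push_cast; ring
    have hj : jinsu (((i + 1 : Nat) : Int)) (N : Int) = rep N (i + 1) :=
      jinsu_eq N hN2 hN16 (i + 1)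
    rw [aLoop]
    simp only [hi1, hj]
    have hans : ('0' :: F N i) ++ rep N (i + 1) = '0' :: F N (i + 1) := by
      rw [F_succ]; rfl
    rw [hans]
    by_cases hc : mt ≤ ((('0' :: F N (i + 1)).length : Nat) : Int)
    · rw [if_pos hc]
      refine ⟨i + 1, rfl, ?_⟩
      simpa using hc
    · rw [if_neg hc]
      exact IH (i + 1) (by push_cast at hfuel ⊢; omega)

lemma sampleLemma (answer : List Char) (T : Nat) (hT : 1 ≤ T) :
    ∀ js real, real.length < T → T ≤ real.length + js.length →
    (∀ j ∈ js, (PySem.List.pyGet? answer j).isSome) →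
    sampleLoop answer (T : Int) js real
      = some (real ++ (js.take (T - real.length)).map (fun j => (PySem.List.pyGet? answer j).getD '?')) := by
  intro js
  induction js with
  | nil => intro real h1 h2 _; simp at h2; omega
  | cons j rest IH =>
    intro real h1 h2 hsome
    obtain ⟨c, hc⟩ := Option.isSome_iff_exists.mp (hsome j (by simp))
    rw [sampleLoop, hc]
    change (if ((real ++ [c]).length : Int) = (T : Int) then some (real ++ [c])
      else sampleLoop answer (T : Int) rest (real ++ [c])) = _
    by_cases hfin : real.length + 1 = T
    · rw [if_pos (by simp; omega)]
      have ht1 : T - real.length = 1 := by omega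
      rw [ht1]
      simp [hc]
    · rw [if_neg (by simp; omega)]
      rw [IH (real ++ [c]) (by simp; omega) (by simp at h2 ⊢; omega)
        (fun x hx => hsome x (by simp [hx]))]
      have ht2 : T - real.length = (T - (real ++ [c]).length) + 1 := by simp; omega
      rw [ht2, List.take_succ_cons, List.map_cons, hc]
      simp

lemma pyGet_isSome {α : Type} (xs : List α) (i : Int)
    (h1 : -(xs.length : Int) ≤ i) (h2 : i < (xs.length : Int)) :
    (PySem.List.pyGet? xs i).isSome := by
  rw [← Option.ne_none_iff_isSome]
  intro hnone
  exact (PySem.List.pyGet?_eq_none_iff xs i).mp hnone ⟨h1, h2⟩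

-- ===== VERDICT (by name: the statement is the Claim_ definition above) =====
theorem solution_spec : Claim_equal_solution := by
  unfold Claim_equal_solution
  intro n t m p _ hpre
  unfold Spec_solution
  obtain ⟨hn2, hn16, ht1, hm1, hp1, hpm, hdisj⟩ := hpre
  obtain ⟨N, rfl⟩ : ∃ N : Nat, n = (N : Int) := ⟨n.toNat, (Int.toNat_of_nonneg (by omega)).symm⟩
  obtain ⟨T, rfl⟩ : ∃ T : Nat, t = (T : Int) := ⟨t.toNat, (Int.toNat_of_nonneg (by omega)).symm⟩
  have hN2 : 2 ≤ N := by exact_mod_cast hn2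
  have hN16 : N ≤ 16 := by exact_mod_cast hn16
  have hT1 : 1 ≤ T := by exact_mod_cast ht1
  have hTi : (1 : Int) ≤ (T : Int) := by exact_mod_cast hT1
  have hmlt : (0 : Int) < m := by omega
  have hstart : ('0' :: F N 0) = ['0'] := by simp [F]
  by_cases hmt2 : 2 ≤ m * (T : Int)
  · -- the generic case: both loops build the same string '0' :: F N K
    have hfuel : m * (T : Int) ≤ 1 + ((0 : Nat) : Int) + (((m * (T : Int)).toNat : Nat) : Int) := by
      rw [Int.toNat_of_nonneg (by omega)]; push_cast; omega
    obtain ⟨K, hK, hKlen⟩ := aloop N hN2 hN16 (m * (T : Int)) ((m * (T : Int)).toNat) 0 hfuel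
    simp only [Nat.cast_zero, hstart] at hK
    have hBA : bLoop (N : Int) (m * (T : Int)) ((m * (T : Int)).toNat) [] ['0']
        = aLoop (N : Int) (m * (T : Int)) ((m * (T : Int)).toNat) 0 ['0'] := by
      have hctr0 : ctrOf N 0 = [] := by simp [ctrOf]
      have hentry : ((('0' :: F N 0).length : Nat) : Int) < m * (T : Int) := by
        rw [hstart]; simpa using hmt2
      have h := abLoop N hN2 hN16 (m * (T : Int)) ((m * (T : Int)).toNat) 0 hentry
      rw [hctr0, hstart, Nat.cast_zero] at h
      exact h
    have hblen : m * (T : Int) ≤ (('0' :: F N K).length : Int) := by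
      push_cast at hKlen ⊢
      simp only [List.length_cons] at *
      omega
    have hsome : ∀ j ∈ PySem.List.pyRange (p - 1) ((('0' :: F N K).length : Nat) : Int) m,
        (PySem.List.pyGet? ('0' :: F N K) j).isSome = true := by
      intro j hj
      obtain ⟨hj1, hj2, -⟩ := (PySem.List.mem_pyRange_iff_of_pos hmlt j).mp hj
      exact pyGet_isSome _ j (by omega) hj2
    have hab : p - 1 < (('0' :: F N K).length : Int) := by nlinarith [hblen]
    have hjs : PySem.List.pyRange (p - 1) ((('0' :: F N K).length : Nat) : Int) m
        = List.map (fun (k : Nat) => (p - 1) + m * (k : Int))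
            (List.range (((('0' :: F N K).length : Int) - (p - 1) + m - 1) / m).toNat) := by
      rw [PySem.List.pyRange_of_pos _ _ hmlt, if_pos hab]
    have hTcnt : T ≤ (((('0' :: F N K).length : Int) - (p - 1) + m - 1) / m).toNat := by
      have hlc : ((('0' :: F N K).length : Nat) : Int) = ((F N K).length : Int) + 1 := by simp
      have h1 : (T : Int) ≤ ((('0' :: F N K).length : Int) - (p - 1) + m - 1) / m := by
        rw [Int.le_ediv_iff_mul_le hmlt]
        nlinarith [hblen]
      simp only [hlc] at h1 ⊢
      omega
    rw [hjs] at hsome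
    have hA := sampleLemma ('0' :: F N K) T hT1
      (List.map (fun (k : Nat) => (p - 1) + m * (k : Int))
        (List.range (((('0' :: F N K).length : Int) - (p - 1) + m - 1) / m).toNat)) []
      (by simpa using hT1) (by simpa using hTcnt) hsome
    simp only [solution, solution_alt]
    rw [hBA, hK, hjs, hA]
    show String.mk _ = _
    apply congrArg String.mk
    simp only [List.nil_append, List.length_nil, Nat.sub_zero]
    rw [← List.map_take, List.take_range, Nat.min_eq_left hTcnt]
    rw [PySem.List.pyRange_one 0 (T : Int)]
    simp only [Int.sub_zero, Int.toNat_natCast, List.map_map]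
    apply List.map_congr_left
    intro k hk
    simp only [Function.comp]
    congr 1
    ring
  · -- the degenerate case m*t = 1: m = t = p = 1, A's string is "01", B's is "0",
    -- and both sample exactly the character at index 0
    have hm1' : m = 1 := by nlinarith
    have ht1' : (T : Int) = 1 := by nlinarith
    have hp1' : p = 1 := by omega
    have hT1' : T = 1 := by exact_mod_cast ht1'
    subst hm1' hp1' hT1'
    have hd1 : Nat.digits N 1 = [1] := by
      rw [Nat.digits_def' (show 1 < N by omega) (by omega),
        Nat.mod_eq_of_lt (by omega), Nat.div_eq_of_lt (by omega)]
      simp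
    have hrep1 : rep N 1 = ['1'] := by
      rw [rep, hd1]
      decide
    have hmt : (1 : Int) * ((1 : Nat) : Int) = 1 := by norm_num
    have hAans : aLoop (N : Int) 1 1 0 ['0'] = ['0', '1'] := by
      rw [aLoop]
      have h01 : (0 : Int) + 1 = ((1 : Nat) : Int) := by norm_num
      simp only [h01, jinsu_eq N hN2 hN16 1, hrep1]
      norm_num
    have hBans : bLoop (N : Int) 1 1 [] ['0'] = ['0'] :=
      bLoop_stop _ _ _ _ _ (by simp)
    simp only [solution, solution_alt, hmt, show ((1 : Int)).toNat = 1 from rfl, hAans, hBans]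
    decide
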